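-- pv_equiv track=rewrite | github.com/da7a90-backup/satyogamvp | backend/scripts/seed_products.py | determine_product_type
-- ===== SOURCE A (Python) =====
-- def determine_product_type(categories: list, woo_type: list) -> str:
--     """Determine ProductType enum from categories and woo_type"""
--     if not categories:
--         return "PHYSICAL"
--
--     # Check categories
--     has_audio = any('Audio' in cat for cat in categories)
--     has_video = any('Video' in cat for cat in categories)
--     has_retreat = any('Retreat' in cat for cat in categories)
--     has_ebook = any('E-Book' in cat or 'ebook' in cat.lower() for cat in categories)
--     has_guided = any('Guided' in cat for cat in categories)
--
--     if has_retreat and (has_audio or has_video):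
--         return "RETREAT_PORTAL_ACCESS"
--     elif has_audio and has_video:
--         return "AUDIO_VIDEO"
--     elif has_video:
--         return "VIDEO"
--     elif has_audio:
--         return "AUDIO"
--     elif has_ebook:
--         return "EBOOK"
--     elif has_guided:
--         return "GUIDED_MEDITATION"
--     else:
--         return "PHYSICAL"
-- ===== SOURCE B (Python) =====
-- # Bitmask encoding + precomputed 32-entry decision table instead of five flags and an if/elif cascade.
--
-- _TABLE = (
--     "PHYSICAL", "AUDIO", "VIDEO", "AUDIO_VIDEO",
--     "PHYSICAL", "RETREAT_PORTAL_ACCESS", "RETREAT_PORTAL_ACCESS", "RETREAT_PORTAL_ACCESS",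
--     "EBOOK", "AUDIO", "VIDEO", "AUDIO_VIDEO",
--     "EBOOK", "RETREAT_PORTAL_ACCESS", "RETREAT_PORTAL_ACCESS", "RETREAT_PORTAL_ACCESS",
--     "GUIDED_MEDITATION", "AUDIO", "VIDEO", "AUDIO_VIDEO",
--     "GUIDED_MEDITATION", "RETREAT_PORTAL_ACCESS", "RETREAT_PORTAL_ACCESS", "RETREAT_PORTAL_ACCESS",
--     "EBOOK", "AUDIO", "VIDEO", "AUDIO_VIDEO",
--     "EBOOK", "RETREAT_PORTAL_ACCESS", "RETREAT_PORTAL_ACCESS", "RETREAT_PORTAL_ACCESS",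
-- )
--
--
-- def _cat_mask(cat: str) -> int:
--     """5-bit mask of the keywords present in one category string."""
--     m = 0
--     if 'Audio' in cat:
--         m |= 1
--     if 'Video' in cat:
--         m |= 2
--     if 'Retreat' in cat:
--         m |= 4
--     if 'E-Book' in cat or 'ebook' in cat.lower():
--         m |= 8
--     if 'Guided' in cat:
--         m |= 16
--     return m
--
--
-- def determine_product_type(categories: list, woo_type: list) -> str:
--     """Determine ProductType enum from categories and woo_type"""
--     if not categories:
--         return "PHYSICAL"
--     mask = 0
--     for cat in categories:
--         mask |= _cat_mask(cat)
--     return _TABLE[mask]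
-- ===== Notes on version B (the rewrite author's own statement) =====
-- stated objective: alternative
-- what changed: Replaced the five boolean any() scans and the if/elif cascade by OR-accumulating a 5-bit keyword mask per category and indexing a precomputed 32-entry decision table.
import Mathlib
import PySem

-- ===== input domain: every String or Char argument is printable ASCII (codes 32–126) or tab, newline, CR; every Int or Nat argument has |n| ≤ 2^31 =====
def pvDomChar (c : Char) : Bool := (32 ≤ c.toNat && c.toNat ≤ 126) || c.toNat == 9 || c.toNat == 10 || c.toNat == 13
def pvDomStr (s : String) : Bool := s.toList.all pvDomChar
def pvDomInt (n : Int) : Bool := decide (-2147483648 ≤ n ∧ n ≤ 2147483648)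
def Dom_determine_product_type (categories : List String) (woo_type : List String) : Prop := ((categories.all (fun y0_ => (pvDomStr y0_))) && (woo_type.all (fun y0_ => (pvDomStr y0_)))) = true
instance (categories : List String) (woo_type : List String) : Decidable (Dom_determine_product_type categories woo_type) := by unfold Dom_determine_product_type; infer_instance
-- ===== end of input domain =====

-- B replaces the five any-scans and the if/elif cascade by OR-accumulating a 5-bit keyword mask and indexing a 32-entry decision table (alternative decomposition).


-- ===== PORT A =====
-- Literal port: five independent any-scans, then the if/elif cascade.
def determine_product_type (categories : List String) (woo_type : List String) : String :=
  if categories.isEmpty then "PHYSICAL"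
  else
    let has_audio := categories.any (fun cat => PySem.Str.isIn "Audio" cat)
    let has_video := categories.any (fun cat => PySem.Str.isIn "Video" cat)
    let has_retreat := categories.any (fun cat => PySem.Str.isIn "Retreat" cat)
    let has_ebook := categories.any (fun cat => PySem.Str.isIn "E-Book" cat || PySem.Str.isIn "ebook" (PySem.Str.lower cat))
    let has_guided := categories.any (fun cat => PySem.Str.isIn "Guided" cat)
    if has_retreat && (has_audio || has_video) then "RETREAT_PORTAL_ACCESS"
    else if has_audio && has_video then "AUDIO_VIDEO"
    else if has_video then "VIDEO"
    else if has_audio then "AUDIO"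
    else if has_ebook then "EBOOK"
    else if has_guided then "GUIDED_MEDITATION"
    else "PHYSICAL"

-- ===== PORT B =====
-- Precomputed decision table indexed by the 5-bit keyword mask.
def pvTable : List String :=
  [ "PHYSICAL", "AUDIO", "VIDEO", "AUDIO_VIDEO",
    "PHYSICAL", "RETREAT_PORTAL_ACCESS", "RETREAT_PORTAL_ACCESS", "RETREAT_PORTAL_ACCESS",
    "EBOOK", "AUDIO", "VIDEO", "AUDIO_VIDEO",
    "EBOOK", "RETREAT_PORTAL_ACCESS", "RETREAT_PORTAL_ACCESS", "RETREAT_PORTAL_ACCESS",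
    "GUIDED_MEDITATION", "AUDIO", "VIDEO", "AUDIO_VIDEO",
    "GUIDED_MEDITATION", "RETREAT_PORTAL_ACCESS", "RETREAT_PORTAL_ACCESS", "RETREAT_PORTAL_ACCESS",
    "EBOOK", "AUDIO", "VIDEO", "AUDIO_VIDEO",
    "EBOOK", "RETREAT_PORTAL_ACCESS", "RETREAT_PORTAL_ACCESS", "RETREAT_PORTAL_ACCESS" ]

-- 5-bit mask of the keywords present in one category string (port of _cat_mask).
def pvCatMask (cat : String) : Nat :=
  let m : Nat := 0
  let m := if PySem.Str.isIn "Audio" cat then m ||| 1 else m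
  let m := if PySem.Str.isIn "Video" cat then m ||| 2 else m
  let m := if PySem.Str.isIn "Retreat" cat then m ||| 4 else m
  let m := if PySem.Str.isIn "E-Book" cat || PySem.Str.isIn "ebook" (PySem.Str.lower cat) then m ||| 8 else m
  let m := if PySem.Str.isIn "Guided" cat then m ||| 16 else m
  m

def determine_product_type_alt (categories : List String) (woo_type : List String) : String :=
  if categories.isEmpty then "PHYSICAL"
  else
    -- OR the per-category masks together, then look the result up in the table
    -- (the mask is always < 32, so the getD default is never consulted).
    pvTable.getD (categories.foldl (fun m cat => m ||| pvCatMask cat) 0) "PHYSICAL"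

-- ===== PRECONDITION & SPEC =====
def Spec_determine_product_type (categories : List String) (woo_type : List String) (out : String) : Prop := out = determine_product_type_alt categories woo_type
instance (categories : List String) (woo_type : List String) (out : String) : Decidable (Spec_determine_product_type categories woo_type out) := by unfold Spec_determine_product_type; infer_instance

-- ===== CLAIM =====
def Claim_equal_determine_product_type : Prop := ∀ (categories : List String) (woo_type : List String), Dom_determine_product_type categories woo_type → Spec_determine_product_type categories woo_type (determine_product_type categories woo_type)

-- ===== LEMMAS AND PROOFS =====

-- Encoding of five flags as the 5-bit mask.
def pvEnc (a v r e g : Bool) : Nat := a.toNat + 2 * v.toNat + 4 * r.toNat + 8 * e.toNat + 16 * g.toNat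

theorem pvEnc_lor (a v r e g b1 b2 b3 b4 b5 : Bool) :
    pvEnc a v r e g ||| pvEnc b1 b2 b3 b4 b5 = pvEnc (a || b1) (v || b2) (r || b3) (e || b4) (g || b5) := by
  cases a <;> cases v <;> cases r <;> cases e <;> cases g <;>
    cases b1 <;> cases b2 <;> cases b3 <;> cases b4 <;> cases b5 <;> decide

theorem pvCatMask_eq (cat : String) :
    pvCatMask cat = pvEnc (PySem.Str.isIn "Audio" cat) (PySem.Str.isIn "Video" cat)
      (PySem.Str.isIn "Retreat" cat)
      (PySem.Str.isIn "E-Book" cat || PySem.Str.isIn "ebook" (PySem.Str.lower cat))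
      (PySem.Str.isIn "Guided" cat) := by
  unfold pvCatMask pvEnc
  cases h1 : PySem.Str.isIn "Audio" cat <;>
    cases h2 : PySem.Str.isIn "Video" cat <;>
      cases h3 : PySem.Str.isIn "Retreat" cat <;>
        cases h4 : (PySem.Str.isIn "E-Book" cat || PySem.Str.isIn "ebook" (PySem.Str.lower cat)) <;>
          cases h5 : PySem.Str.isIn "Guided" cat <;>
            simp [h1, h2, h3, h4, h5]

theorem pvMask_foldl (l : List String) (a v r e g : Bool) :
    l.foldl (fun m cat => m ||| pvCatMask cat) (pvEnc a v r e g) =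
      pvEnc (a || l.any (fun cat => PySem.Str.isIn "Audio" cat))
            (v || l.any (fun cat => PySem.Str.isIn "Video" cat))
            (r || l.any (fun cat => PySem.Str.isIn "Retreat" cat))
            (e || l.any (fun cat => PySem.Str.isIn "E-Book" cat || PySem.Str.isIn "ebook" (PySem.Str.lower cat)))
            (g || l.any (fun cat => PySem.Str.isIn "Guided" cat)) := by
  induction l generalizing a v r e g with
  | nil => simp
  | cons x xs ih =>
    rw [List.foldl_cons, pvCatMask_eq, pvEnc_lor, ih]
    simp [List.any_cons, Bool.or_assoc]

theorem pvDecode (a v r e g : Bool) :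
    pvTable.getD (pvEnc a v r e g) "PHYSICAL" =
      (if r && (a || v) then "RETREAT_PORTAL_ACCESS"
       else if a && v then "AUDIO_VIDEO"
       else if v then "VIDEO"
       else if a then "AUDIO"
       else if e then "EBOOK"
       else if g then "GUIDED_MEDITATION"
       else "PHYSICAL") := by
  cases a <;> cases v <;> cases r <;> cases e <;> cases g <;> rfl

theorem determine_product_type_spec : Claim_equal_determine_product_type := by
  intro categories woo_type _
  unfold Spec_determine_product_type determine_product_type determine_product_type_alt
  by_cases h : categories.isEmpty
  · simp [h]
  · have h0 : (0 : Nat) = pvEnc false false false false false := rfl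
    simp only [h, h0, pvMask_foldl, Bool.false_or, pvDecode]
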